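-- pv_equiv track=rewrite | github.com/OrthoFinder/RECUR | src/recur/utils/util.py | get_sorted_res_loc_info
-- ===== SOURCE A (Python) =====
-- from typing import Dict, Iterator, List, Optional, Tuple
--
-- def get_sorted_res_loc_info(res_loc_count_dict: Dict[Tuple[int, int, int], int],
--                             protein_len: int) -> Dict[int, List[Tuple[int, int, int]]]:
--
--
--     res_loc_info_dict: Dict[int, List[Tuple[int, int, int]]] = {
--         res_loc: [] for res_loc in range(protein_len)
--     }
--
--     for (res_loc, parent_id, child_id), recurrence in res_loc_count_dict.items():
--         res_loc_info_dict[res_loc].append((parent_id, child_id, recurrence))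
--
--     res_loc_info_dict_sorted: Dict[int, List[Tuple[int, int, int]]] = {
--         res_loc: sorted(val, key=lambda x: x[-1], reverse=True) if val else []
--         for res_loc, val in res_loc_info_dict.items()
--     }
--
--     return res_loc_info_dict_sorted
-- ===== SOURCE B (Python) =====
-- def get_sorted_res_loc_info(res_loc_count_dict, protein_len):
--     # One global stable descending sort on recurrence, then a single
--     # distribution pass into positional buckets; no per-bucket sorting.
--     buckets = [[] for _ in range(protein_len)]
--     order = sorted(res_loc_count_dict.items(), key=lambda kv: kv[1], reverse=True)
--     for (res_loc, parent_id, child_id), recurrence in order: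
--         buckets[res_loc].append((parent_id, child_id, recurrence))
--     return {i: bucket for i, bucket in enumerate(buckets)}
-- ===== Notes on version B (the rewrite author's own statement) =====
-- stated objective: alternative
-- what changed: Instead of appending items into a per-res_loc dict and then sorting every bucket separately, B sorts the whole items list once with a stable descending sort on recurrence and makes a single distribution pass into positional list buckets; Pre_ excludes inputs where A raises KeyError (a res_loc outside range(protein_len)) and association lists with duplicated (res_loc,parent,child) keys, which encode no Python dict input.
import Mathlib
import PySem

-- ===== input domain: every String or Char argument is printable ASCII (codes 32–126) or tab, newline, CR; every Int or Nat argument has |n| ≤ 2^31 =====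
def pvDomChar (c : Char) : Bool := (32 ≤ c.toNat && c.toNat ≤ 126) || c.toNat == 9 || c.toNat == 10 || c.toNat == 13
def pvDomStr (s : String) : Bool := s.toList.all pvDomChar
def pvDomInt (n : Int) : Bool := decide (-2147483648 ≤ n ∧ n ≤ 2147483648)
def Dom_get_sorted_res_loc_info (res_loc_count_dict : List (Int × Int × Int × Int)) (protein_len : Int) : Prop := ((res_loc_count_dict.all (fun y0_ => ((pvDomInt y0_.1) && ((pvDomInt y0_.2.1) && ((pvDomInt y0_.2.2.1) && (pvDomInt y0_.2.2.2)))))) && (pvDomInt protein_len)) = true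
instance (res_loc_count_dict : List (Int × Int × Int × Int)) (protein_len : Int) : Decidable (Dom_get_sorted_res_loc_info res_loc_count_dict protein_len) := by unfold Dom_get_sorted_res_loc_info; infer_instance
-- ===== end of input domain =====

-- B replaces A's per-bucket sorts by ONE global stable descending sort on recurrence followed
-- by a single distribution pass into positional list buckets; return values agree on Pre_.

-- ===== PORT A =====
def get_sorted_res_loc_info (res_loc_count_dict : List (Int × Int × Int × Int)) (protein_len : Int) : List (Int × List (Int × Int × Int)) :=
  -- res_loc_info_dict = {res_loc: [] for res_loc in range(protein_len)}
  let res_loc_info_dict : PySem.Dict Int (List (Int × Int × Int)) :=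
    (PySem.List.pyRange 0 protein_len 1).foldl (fun d r => d.insert r []) PySem.Dict.empty
  -- for (res_loc, parent_id, child_id), recurrence in ...items(): res_loc_info_dict[res_loc].append(...)
  -- (Dict.modify is the total form of d[res_loc].append; the KeyError inputs are excluded by Pre_)
  let filled : PySem.Dict Int (List (Int × Int × Int)) :=
    res_loc_count_dict.foldl
      (fun d it => d.modify it.1 [] (fun v => v ++ [(it.2.1, it.2.2.1, it.2.2.2)]))
      res_loc_info_dict
  -- {res_loc: sorted(val, key=lambda x: x[-1], reverse=True) if val else [] for res_loc, val in ...}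
  filled.items.map (fun kv =>
    (kv.1, if kv.2.isEmpty then [] else PySem.List.sorted kv.2 (fun x => x.2.2) true))

-- ===== PORT B =====
def get_sorted_res_loc_info_alt (res_loc_count_dict : List (Int × Int × Int × Int)) (protein_len : Int) : List (Int × List (Int × Int × Int)) :=
  -- buckets = [[] for _ in range(protein_len)]
  let buckets : List (List (Int × Int × Int)) :=
    (PySem.List.pyRange 0 protein_len 1).map (fun _ => [])
  -- order = sorted(res_loc_count_dict.items(), key=lambda kv: kv[1], reverse=True)
  let order := PySem.List.sorted res_loc_count_dict (fun kv => kv.2.2.2) true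
  -- for (res_loc, parent_id, child_id), recurrence in order: buckets[res_loc].append(...)
  -- (pySetD/pyGetD: the total forms of buckets[res_loc]; indices are in range on Pre_)
  let final := order.foldl
    (fun bs it => PySem.List.pySetD bs it.1
      (PySem.List.pyGetD bs it.1 [] ++ [(it.2.1, it.2.2.1, it.2.2.2)])) buckets
  -- {i: bucket for i, bucket in enumerate(buckets)}
  PySem.List.enumerate final 0

-- ===== PRECONDITION & SPEC =====
-- Pre_ excludes inputs where A raises KeyError (a res_loc outside range(protein_len)) and
-- association lists with a duplicated (res_loc, parent, child) key, which encode no Python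
-- dict input of A (a dict cannot hold the same key twice).
def Pre_get_sorted_res_loc_info (res_loc_count_dict : List (Int × Int × Int × Int)) (protein_len : Int) : Prop :=
  (∀ kv ∈ res_loc_count_dict, 0 ≤ kv.1 ∧ kv.1 < protein_len) ∧
  (res_loc_count_dict.map (fun kv => (kv.1, kv.2.1, kv.2.2.1))).Nodup
instance (res_loc_count_dict : List (Int × Int × Int × Int)) (protein_len : Int) : Decidable (Pre_get_sorted_res_loc_info res_loc_count_dict protein_len) := by unfold Pre_get_sorted_res_loc_info; infer_instance
def pvWitness_get_sorted_res_loc_info : (List (Int × Int × Int × Int)) × Int := ([(0, 1, 2, 3), (1, 4, 5, 2), (0, 6, 7, 3)], 2)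

def Spec_get_sorted_res_loc_info (res_loc_count_dict : List (Int × Int × Int × Int)) (protein_len : Int) (out : List (Int × List (Int × Int × Int))) : Prop := out = get_sorted_res_loc_info_alt res_loc_count_dict protein_len
instance (res_loc_count_dict : List (Int × Int × Int × Int)) (protein_len : Int) (out : List (Int × List (Int × Int × Int))) : Decidable (Spec_get_sorted_res_loc_info res_loc_count_dict protein_len out) := by unfold Spec_get_sorted_res_loc_info; infer_instance

-- ===== CLAIM (what is proved, stated in full; the proofs are below) =====
def Claim_equal_get_sorted_res_loc_info : Prop := ∀ (res_loc_count_dict : List (Int × Int × Int × Int)) (protein_len : Int), Dom_get_sorted_res_loc_info res_loc_count_dict protein_len → Pre_get_sorted_res_loc_info res_loc_count_dict protein_len → Spec_get_sorted_res_loc_info res_loc_count_dict protein_len (get_sorted_res_loc_info res_loc_count_dict protein_len)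

-- ===== LEMMAS AND PROOFS =====

-- the value both programs append for one dict item: (parent_id, child_id, recurrence)
def pvProj (kv : Int × Int × Int × Int) : Int × Int × Int := (kv.2.1, kv.2.2.1, kv.2.2.2)

theorem insertBy_nil {α : Type} (b : α → α → Bool) (x : α) :
    PySem.List.insertBy b x [] = [x] := by simp [PySem.List.insertBy]

theorem insertBy_cons {α : Type} (b : α → α → Bool) (x y : α) (t : List α) :
    PySem.List.insertBy b x (y :: t) = if b x y then x :: y :: t else y :: PySem.List.insertBy b x t := by
  simp [PySem.List.insertBy]

-- inserting above every element of a list puts the element in front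
theorem insertBy_front {α : Type} (b : α → α → Bool) (x : α) (l : List α)
    (h : ∀ z ∈ l, b x z = true) : PySem.List.insertBy b x l = x :: l := by
  cases l with
  | nil => exact insertBy_nil b x
  | cons y t => rw [insertBy_cons, if_pos (h y (by simp))]

-- descending insertion keeps a descending list descending
theorem insertBy_desc {α : Type} (key : α → Int) (x : α) (ys : List α)
    (h : ys.Pairwise (fun a c => key c ≤ key a)) :
    (PySem.List.insertBy (fun a c => decide (key c < key a)) x ys).Pairwise (fun a c => key c ≤ key a) := by
  induction ys with
  | nil => simp [insertBy_nil]
  | cons y t ih =>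
    rw [insertBy_cons]
    rcases List.pairwise_cons.mp h with ⟨hy, ht⟩
    by_cases hxy : key y < key x
    · simp only [hxy, decide_true, if_pos]
      refine List.pairwise_cons.mpr ⟨?_, h⟩
      intro z hz
      rcases List.mem_cons.mp hz with rfl | hz
      · omega
      · exact le_trans (hy z hz) (le_of_lt hxy)
    · simp only [hxy, decide_false, Bool.false_eq_true, if_neg, not_false_iff]
      refine List.pairwise_cons.mpr ⟨?_, ih ht⟩
      intro z hz
      rcases (PySem.List.mem_insertBy _ x z t).mp hz with rfl | hz
      · omega
      · exact hy z hz

-- filtering commutes with descending insertion into a descending list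
theorem filter_insertBy {α : Type} (key : α → Int) (p : α → Bool) (x : α) (ys : List α)
    (h : ys.Pairwise (fun a c => key c ≤ key a)) :
    (PySem.List.insertBy (fun a c => decide (key c < key a)) x ys).filter p
      = if p x then PySem.List.insertBy (fun a c => decide (key c < key a)) x (ys.filter p)
        else ys.filter p := by
  induction ys with
  | nil => cases hp : p x <;> simp [insertBy_nil, hp]
  | cons y t ih =>
    rcases List.pairwise_cons.mp h with ⟨hy, ht⟩
    rw [insertBy_cons]
    by_cases hxy : key y < key x
    · simp only [hxy, decide_true, if_pos]
      have hfront : PySem.List.insertBy (fun a c => decide (key c < key a)) x ((y :: t).filter p)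
          = x :: (y :: t).filter p := by
        apply insertBy_front
        intro z hz
        have hzmem : z ∈ y :: t := List.mem_of_mem_filter hz
        have hle : key z ≤ key y := by
          rcases List.mem_cons.mp hzmem with rfl | hzt
          · omega
          · exact hy z hzt
        simp; omega
      cases hp : p x
      · simp [List.filter_cons, hp]
      · rw [if_pos rfl, hfront, List.filter_cons, hp, if_pos rfl]
    · simp only [hxy, decide_false, Bool.false_eq_true, if_neg, not_false_iff]
      rw [List.filter_cons, List.filter_cons, ih ht]
      cases hp : p x <;> cases hpy : p y <;> simp [insertBy_cons, hxy]

-- a key-preserving map commutes with descending insertion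
theorem map_insertBy {α β : Type} (key : α → Int) (key' : β → Int) (f : α → β)
    (hf : ∀ a, key' (f a) = key a) (x : α) (ys : List α) :
    (PySem.List.insertBy (fun a c => decide (key c < key a)) x ys).map f
      = PySem.List.insertBy (fun a c => decide (key' c < key' a)) (f x) (ys.map f) := by
  induction ys with
  | nil => simp [insertBy_nil]
  | cons y t ih =>
    rw [insertBy_cons, List.map_cons, insertBy_cons, hf, hf]
    by_cases hxy : key y < key x
    · simp [hxy]
    · simp [hxy, ih]

theorem filter_foldl_insertBy {α : Type} (key : α → Int) (p : α → Bool) (l : List α) (acc : List α)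
    (h : acc.Pairwise (fun a c => key c ≤ key a)) :
    (l.foldl (fun acc x => PySem.List.insertBy (fun a c => decide (key c < key a)) x acc) acc).filter p
      = (l.filter p).foldl (fun acc x => PySem.List.insertBy (fun a c => decide (key c < key a)) x acc)
          (acc.filter p) := by
  induction l generalizing acc with
  | nil => rfl
  | cons x t ih =>
    simp only [List.foldl_cons]
    rw [ih _ (insertBy_desc key x acc h)]
    rw [filter_insertBy key p x acc h]
    cases hp : p x <;> simp [List.filter, hp]

-- a filter of Python's stable descending sort is the stable descending sort of the filter
theorem sorted_rev_filter {α : Type} (key : α → Int) (p : α → Bool) (l : List α) :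
    (PySem.List.sorted l key true).filter p = PySem.List.sorted (l.filter p) key true := by
  rw [PySem.List.sorted_rev_eq_foldl_insertBy, PySem.List.sorted_rev_eq_foldl_insertBy]
  exact filter_foldl_insertBy key p l [] (by simp)

-- a key-preserving map commutes with Python's stable descending sort
theorem sorted_rev_map {α β : Type} (key : α → Int) (key' : β → Int) (f : α → β)
    (hf : ∀ a, key' (f a) = key a) (l : List α) :
    (PySem.List.sorted l key true).map f = PySem.List.sorted (l.map f) key' true := by
  rw [PySem.List.sorted_rev_eq_foldl_insertBy, PySem.List.sorted_rev_eq_foldl_insertBy]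
  have haux : ∀ (l acc : List α),
      (l.foldl (fun acc x => PySem.List.insertBy (fun a c => decide (key c < key a)) x acc) acc).map f
        = (l.map f).foldl (fun acc x => PySem.List.insertBy (fun a c => decide (key' c < key' a)) x acc)
            (acc.map f) := by
    intro l
    induction l with
    | nil => intro acc; rfl
    | cons x t ih =>
      intro acc
      simp only [List.map_cons, List.foldl_cons]
      rw [ih, map_insertBy key key' f hf]
  exact haux l []

-- the per-res_loc bucket identity: A's per-bucket sort equals B's global-sort-then-filter
theorem bucket_eq (d : List (Int × Int × Int × Int)) (i : Int) :
    ((PySem.List.sorted d (fun kv => kv.2.2.2) true).filter (fun kv => kv.1 == i)).map pvProj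
      = PySem.List.sorted ((d.filter (fun kv => kv.1 == i)).map pvProj) (fun x => x.2.2) true := by
  rw [sorted_rev_filter]
  exact sorted_rev_map (fun kv => kv.2.2.2) (fun x => x.2.2) pvProj (fun a => rfl) _

-- ===== the A side =====

-- {res_loc: [] for res_loc in range(n)} has items range-map
theorem dict_init_items (rs : List Int) (acc : PySem.Dict Int (List (Int × Int × Int)))
    (hnd : rs.Nodup) (hfresh : ∀ r ∈ rs, acc.contains r = false) :
    (rs.foldl (fun d r => d.insert r []) acc).items = acc.items ++ rs.map (fun i => (i, [])) := by
  induction rs generalizing acc with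
  | nil => simp
  | cons r t ih =>
    simp only [List.foldl_cons, List.map_cons]
    have hr : acc.contains r = false := hfresh r (by simp)
    have hins : (acc.insert r ([] : List (Int × Int × Int))).items = acc.items ++ [(r, [])] := by
      simp [PySem.Dict.insert, hr]
    rw [ih (acc.insert r []) hnd.of_cons]
    · rw [hins]; simp
    · intro s hs
      have hsr : s ≠ r := fun hsr => (List.nodup_cons.mp hnd).1 (hsr ▸ hs)
      have hsa : acc.contains s = false := hfresh s (by simp [hs])
      simp only [PySem.Dict.contains, hins, List.any_append, List.any_cons, List.any_nil]
      simp only [PySem.Dict.contains] at hsa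
      simp [hsa, Ne.symm hsr]

-- in a key-nodup items list, getD returns the value of the matching entry
theorem getD_of_mem (l : List (Int × List (Int × Int × Int))) (k : Int)
    (e : Int × List (Int × Int × Int)) (hk : e.1 = k) :
    (l.map (fun p => p.1)).Nodup → e ∈ l → (PySem.Dict.mk l).getD k [] = e.2 := by
  induction l with
  | nil => intro _ he; cases he
  | cons q t ih =>
    intro hnd he
    by_cases hq : q.1 = k
    · have hqe : e = q := by
        rcases List.mem_cons.mp he with he | he
        · exact he
        · exfalso
          have hm : q.1 ∈ t.map (fun p => p.1) := by
            rw [hq, ← hk]; exact List.mem_map_of_mem he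
          exact (List.nodup_cons.mp hnd).1 hm
      subst hqe
      simp [PySem.Dict.getD, PySem.Dict.get?, List.find?, hq]
    · have he' : e ∈ t := by
        rcases List.mem_cons.mp he with he | he
        · exact absurd (he ▸ hk) hq
        · exact he
      have hrec := ih (List.nodup_cons.mp hnd).2 he'
      simp only [PySem.Dict.getD, PySem.Dict.get?, List.find?] at hrec ⊢
      simp only [show (q.1 == k) = false by simp [hq]]
      exact hrec

-- d[k] = f applied in place, when k is present and keys are nodup
theorem modify_items_of_contains (l : List (Int × List (Int × Int × Int))) (k : Int)
    (f : List (Int × Int × Int) → List (Int × Int × Int))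
    (hnd : (l.map (fun p => p.1)).Nodup) (hc : (PySem.Dict.mk l).contains k = true) :
    ((PySem.Dict.mk l).modify k [] f).items = l.map (fun e => if e.1 = k then (e.1, f e.2) else e) := by
  simp only [PySem.Dict.modify, PySem.Dict.insert, hc, if_pos]
  apply List.map_congr_left
  intro p hp
  by_cases hpk : p.1 = k
  · rw [getD_of_mem l k p hpk hnd hp]
    simp [hpk]
  · simp [hpk]

-- distributing the items into the dict appends, per key, the projected matching items in order
theorem dict_fill_items (d : List (Int × Int × Int × Int))
    (acc : PySem.Dict Int (List (Int × Int × Int)))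
    (hmem : ∀ kv ∈ d, acc.contains kv.1 = true)
    (hnd : (acc.items.map (fun p => p.1)).Nodup) :
    (d.foldl (fun a it => a.modify it.1 [] (fun v => v ++ [(it.2.1, it.2.2.1, it.2.2.2)])) acc).items
      = acc.items.map (fun e => (e.1, e.2 ++ (d.filter (fun kv => kv.1 == e.1)).map pvProj)) := by
  induction d generalizing acc with
  | nil => simp
  | cons it t ih =>
    simp only [List.foldl_cons]
    have hit : acc.contains it.1 = true := hmem it (by simp)
    obtain ⟨l⟩ := acc
    have hmod : ((PySem.Dict.mk l).modify it.1 [] (fun v => v ++ [(it.2.1, it.2.2.1, it.2.2.2)])).items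
        = l.map (fun e => if e.1 = it.1 then (e.1, e.2 ++ [pvProj it]) else e) :=
      modify_items_of_contains l it.1 _ hnd hit
    have hkeys : ((((PySem.Dict.mk l).modify it.1 [] (fun v => v ++ [(it.2.1, it.2.2.1, it.2.2.2)])).items).map
        (fun p => p.1)) = l.map (fun p => p.1) := by
      rw [hmod, List.map_map]
      apply List.map_congr_left
      intro p _
      by_cases hpk : p.1 = it.1 <;> simp [hpk]
    rw [ih _ ?hm ?hn]
    case hm =>
      intro kv hkv
      have := hmem kv (by simp [hkv])
      simp only [PySem.Dict.contains] at this ⊢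
      rw [List.any_eq_true] at this ⊢
      rcases this with ⟨p, hp, hpe⟩
      have : p.1 ∈ (((PySem.Dict.mk l).modify it.1 [] (fun v => v ++ [(it.2.1, it.2.2.1, it.2.2.2)])).items).map (fun q => q.1) := by
        rw [hkeys]; exact List.mem_map_of_mem hp
      rcases List.mem_map.mp this with ⟨q, hq, hqe⟩
      exact ⟨q, hq, by rw [hqe]; exact hpe⟩
    case hn => rw [hkeys]; exact hnd
    rw [hmod, List.map_map]
    apply List.map_congr_left
    intro e _
    by_cases hek : e.1 = it.1
    · simp only [Function.comp, hek, if_pos, List.filter]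
      simp [List.append_assoc, pvProj]
    · have : (it.1 == e.1) = false := by simp; exact fun h => hek h.symm
      simp [Function.comp, hek, List.filter, this]

-- the A port, characterised as a map over range(protein_len)
theorem portA_char (d : List (Int × Int × Int × Int)) (n : Int)
    (hpre : ∀ kv ∈ d, 0 ≤ kv.1 ∧ kv.1 < n) :
    get_sorted_res_loc_info d n
      = (PySem.List.pyRange 0 n 1).map (fun i =>
          (i, PySem.List.sorted ((d.filter (fun kv => kv.1 == i)).map pvProj) (fun x => x.2.2) true)) := by
  simp only [get_sorted_res_loc_info]
  have hinit : ((PySem.List.pyRange 0 n 1).foldl (fun d r => d.insert r ([] : List (Int × Int × Int))) PySem.Dict.empty).items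
      = (PySem.List.pyRange 0 n 1).map (fun i => (i, ([] : List (Int × Int × Int)))) := by
    rw [dict_init_items _ _ (PySem.List.nodup_pyRange_one 0 n) (fun r _ => by simp [PySem.Dict.contains, PySem.Dict.empty])]
    simp [PySem.Dict.empty]
  have hkeys : ((((PySem.List.pyRange 0 n 1).foldl (fun d r => d.insert r ([] : List (Int × Int × Int))) PySem.Dict.empty).items).map (fun p => p.1)).Nodup := by
    rw [hinit, List.map_map]
    have hcomp : ((fun (p : Int × List (Int × Int × Int)) => p.1) ∘ fun i => (i, ([] : List (Int × Int × Int)))) = id := rfl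
    rw [hcomp, List.map_id]
    exact PySem.List.nodup_pyRange_one 0 n
  have hmem : ∀ kv ∈ d, ((PySem.List.pyRange 0 n 1).foldl (fun d r => d.insert r ([] : List (Int × Int × Int))) PySem.Dict.empty).contains kv.1 = true := by
    intro kv hkv
    simp only [PySem.Dict.contains, hinit]
    rw [List.any_eq_true]
    refine ⟨(kv.1, []), List.mem_map_of_mem (PySem.List.mem_pyRange_one.mpr ⟨(hpre kv hkv).1, (hpre kv hkv).2⟩), by simp⟩
  rw [dict_fill_items d _ hmem hkeys, hinit, List.map_map, List.map_map]
  apply List.map_congr_left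
  intro i _
  simp only [Function.comp]
  rcases hb : (d.filter (fun kv => kv.1 == i)).map pvProj with _ | ⟨b, bs⟩
  · simp [hb]
    rfl
  · simp [hb]

-- ===== the B side =====

-- the distribution loop preserves the number of buckets
theorem fillB_len (l : List (Int × Int × Int × Int)) (bs : List (List (Int × Int × Int))) :
    (l.foldl (fun bs it => PySem.List.pySetD bs it.1
        (PySem.List.pyGetD bs it.1 [] ++ [(it.2.1, it.2.2.1, it.2.2.2)])) bs).length = bs.length := by
  induction l generalizing bs with
  | nil => rfl
  | cons it t ih => simp [ih, PySem.List.length_pySetD]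

-- bucket j of the distribution loop: the original bucket plus the matching items in order
theorem fillB_get (l : List (Int × Int × Int × Int)) (bs : List (List (Int × Int × Int)))
    (h : ∀ kv ∈ l, 0 ≤ kv.1 ∧ kv.1 < (bs.length : Int)) (j : Nat) (hj : j < bs.length) :
    (l.foldl (fun bs it => PySem.List.pySetD bs it.1
        (PySem.List.pyGetD bs it.1 [] ++ [(it.2.1, it.2.2.1, it.2.2.2)])) bs)[j]?
      = some (bs[j] ++ (l.filter (fun kv => kv.1 == (j : Int))).map pvProj) := by
  induction l generalizing bs with
  | nil => simp [List.getElem?_eq_getElem hj]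
  | cons it t ih =>
    simp only [List.foldl_cons]
    obtain ⟨h0, h1⟩ := h it (by simp)
    have hacc : PySem.List.pySetD bs it.1 (PySem.List.pyGetD bs it.1 [] ++ [(it.2.1, it.2.2.1, it.2.2.2)])
        = bs.set it.1.toNat ((bs[it.1.toNat]'(by omega)) ++ [(it.2.1, it.2.2.1, it.2.2.2)]) := by
      rw [PySem.List.pySetD_of_nonneg _ _ h0, PySem.List.pyGetD_eq_getElem bs _ h0 h1]
    rw [hacc, ih _ ?hh (by simpa using hj)]
    case hh =>
      intro kv hkv
      have hkb := h kv (by simp [hkv])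
      simpa using hkb
    by_cases hji : it.1.toNat = j
    · have hji' : (it.1 == (j : Int)) = true := by simp; omega
      rw [List.getElem_set]
      simp [hji, hji', pvProj, List.append_assoc]
    · have hji' : (it.1 == (j : Int)) = false := by simp; omega
      rw [List.getElem_set]
      simp [hji, hji']

-- the B port, characterised as a map over range(protein_len)
theorem portB_char (d : List (Int × Int × Int × Int)) (n : Int)
    (hpre : ∀ kv ∈ d, 0 ≤ kv.1 ∧ kv.1 < n) :
    get_sorted_res_loc_info_alt d n
      = (PySem.List.pyRange 0 n 1).map (fun i =>
          (i, ((PySem.List.sorted d (fun kv => kv.2.2.2) true).filter (fun kv => kv.1 == i)).map pvProj)) := by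
  simp only [get_sorted_res_loc_info_alt]
  have hblen : ((PySem.List.pyRange 0 n 1).map (fun _ => ([] : List (Int × Int × Int)))).length
      = (PySem.List.pyRange 0 n 1).length := by simp
  have hs : ∀ kv ∈ PySem.List.sorted d (fun kv => kv.2.2.2) true,
      0 ≤ kv.1 ∧ kv.1 < ((((PySem.List.pyRange 0 n 1).map (fun _ => ([] : List (Int × Int × Int)))).length : Int)) := by
    intro kv hkv
    have hd : kv ∈ d := (PySem.List.mem_sorted _ _ _ _).mp hkv
    obtain ⟨ha, hb⟩ := hpre kv hd
    constructor
    · exact ha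
    · rw [hblen, PySem.List.length_pyRange_one]
      omega
  apply List.ext_getElem
  · simp [PySem.List.length_enumerate, fillB_len]
  · intro k h1 h2
    have hk : k < (PySem.List.pyRange 0 n 1).length := by
      simpa [PySem.List.length_enumerate, fillB_len] using h1
    have hkb : k < ((PySem.List.pyRange 0 n 1).map (fun _ => ([] : List (Int × Int × Int)))).length := by
      simpa using hk
    have hfin := fillB_get (PySem.List.sorted d (fun kv => kv.2.2.2) true) _ hs k hkb
    rw [PySem.List.getElem_enumerate]
    rw [List.getElem_map, PySem.List.getElem_pyRange_one]
    simp only [Prod.mk.injEq]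
    refine ⟨trivial, ?_⟩
    apply Option.some.inj
    rw [← List.getElem?_eq_getElem, hfin]
    simp

-- ===== VERDICT (by name: the statement is the Claim_ definition above) =====
theorem get_sorted_res_loc_info_spec : Claim_equal_get_sorted_res_loc_info := by
  intro d n _ hpre
  unfold Spec_get_sorted_res_loc_info
  rw [portA_char d n hpre.1, portB_char d n hpre.1]
  apply List.map_congr_left
  intro i _
  rw [bucket_eq]
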